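-- pv_equiv track=rewrite | github.com/Lusanco/holberton-coding-school | markdown2html.py | parse_ordered_list
-- ===== SOURCE A (Python) =====
-- def parse_ordered_list(lines):
--     html_list = ["<ol>"]
--     count = 0
--     for line in lines:
--         if line.strip().startswith("* "):
--             html_list.append(f"<li>{line.strip()[2:]}</li>")
--             count += 1
--         else:
--             break
--     html_list.append("</ol>")
--     return "\n".join(html_list), count
-- ===== SOURCE B (Python) =====
-- def parse_ordered_list(lines):
--     def go(ls):
--         # returns (body string after "<ol>", number of items), recursively
--         if ls and ls[0].strip().startswith("* "):
--             body, n = go(ls[1:])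
--             return "\n<li>" + ls[0].strip()[2:] + "</li>" + body, n + 1
--         return "", 0
--     body, count = go(lines)
--     return "<ol>" + body + "\n</ol>", count
-- ===== Notes on version B (the rewrite author's own statement) =====
-- stated objective: alternative
-- what changed: Replaced the list-accumulator loop plus final join by a direct recursion that builds the HTML body string by concatenation (no intermediate list, no join) and counts on the way back up.
import Mathlib
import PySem

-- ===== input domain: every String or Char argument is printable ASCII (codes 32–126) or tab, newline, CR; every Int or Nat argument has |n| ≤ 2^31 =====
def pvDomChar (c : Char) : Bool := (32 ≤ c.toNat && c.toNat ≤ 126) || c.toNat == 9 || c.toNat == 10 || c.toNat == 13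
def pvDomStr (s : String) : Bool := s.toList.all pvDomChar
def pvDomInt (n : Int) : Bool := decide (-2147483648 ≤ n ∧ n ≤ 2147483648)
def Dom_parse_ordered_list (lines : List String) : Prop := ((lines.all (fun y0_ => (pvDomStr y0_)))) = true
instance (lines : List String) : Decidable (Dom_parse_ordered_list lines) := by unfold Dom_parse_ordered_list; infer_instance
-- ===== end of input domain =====

-- B replaces A's list-accumulator loop + join by a recursion that builds the body string by
-- concatenation and counts on the way back up (alternative decomposition, no speed claim).

-- ===== PORT A =====
-- line.strip().startswith("* ")
def pvIsItem (line : String) : Bool :=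
  PySem.Str.startswith (PySem.Str.strip line) "* "

-- f"<li>{line.strip()[2:]}</li>"
def pvMkItem (line : String) : String :=
  PySem.Str.join "" ["<li>", PySem.Str.slice (PySem.Str.strip line) (some 2) none, "</li>"]

-- the for-loop with break, carrying (html_list, count)
def pvLoopA : List String → List String → Int → List String × Int
  | [], acc, count => (acc, count)
  | line :: rest, acc, count =>
    if pvIsItem line then pvLoopA rest (acc ++ [pvMkItem line]) (count + 1)
    else (acc, count)

def parse_ordered_list (lines : List String) : String × Int :=
  let r := pvLoopA lines ["<ol>"] 0
  (PySem.Str.join "\n" (r.1 ++ ["</ol>"]), r.2)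

-- ===== PORT B =====
-- go(ls): builds ("\n<li>…</li>" ++ …, n) recursively; strings handled on the List Char side
def pvGoB : List String → List Char × Int
  | [] => ([], 0)
  | l :: rest =>
    let s := PySem.Chars.strip l.toList
    if PySem.Chars.startswith s "* ".toList then
      let r := pvGoB rest
      ("\n<li>".toList ++ PySem.Chars.slice s (some 2) none ++ "</li>".toList ++ r.1, r.2 + 1)
    else ([], 0)

def parse_ordered_list_alt (lines : List String) : String × Int :=
  let r := pvGoB lines
  (String.ofList ("<ol>".toList ++ r.1 ++ "\n</ol>".toList), r.2)

-- ===== PRECONDITION & SPEC =====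
def Spec_parse_ordered_list (lines : List String) (out : String × Int) : Prop := out = parse_ordered_list_alt lines
instance (lines : List String) (out : String × Int) : Decidable (Spec_parse_ordered_list lines out) := by unfold Spec_parse_ordered_list; infer_instance

-- ===== CLAIM (what is proved, stated in full; the proofs are below) =====
def Claim_equal_parse_ordered_list : Prop := ∀ (lines : List String), Dom_parse_ordered_list lines → Spec_parse_ordered_list lines (parse_ordered_list lines)

-- ===== LEMMAS AND PROOFS =====

-- A's loop leaves acc ++ the mapped matching prefix, and adds its length to count.
theorem pvLoopA_eq (lines : List String) (acc : List String) (count : Int) :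
    pvLoopA lines acc count =
      (acc ++ (lines.takeWhile pvIsItem).map pvMkItem,
       count + ((lines.takeWhile pvIsItem).length : Int)) := by
  induction lines generalizing acc count with
  | nil => simp [pvLoopA]
  | cons l rest ih =>
    by_cases h : pvIsItem l
    · simp [pvLoopA, h, ih]; omega
    · simp [pvLoopA, h]

-- B's recursion produces the flattened "\n"-prefixed items of the matching prefix, and its length.
theorem pvGoB_eq (lines : List String) :
    pvGoB lines =
      ((lines.takeWhile pvIsItem).flatMap (fun l => '\n' :: (pvMkItem l).toList),
       ((lines.takeWhile pvIsItem).length : Int)) := by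
  induction lines with
  | nil => simp [pvGoB]
  | cons l rest ih =>
    by_cases h : pvIsItem l
    · have h' : PySem.Chars.startswith (PySem.Chars.strip l.toList) ['*', ' '] = true := by
        simpa [pvIsItem, PySem.Str.startswith, PySem.Str.strip] using h
      simp [pvGoB, h, h', ih, pvMkItem, PySem.Chars.join_cons_cons, PySem.Chars.join_singleton]
    · have h' : PySem.Chars.startswith (PySem.Chars.strip l.toList) ['*', ' '] = false := by
        simpa [pvIsItem, PySem.Str.startswith, PySem.Str.strip] using h
      simp [pvGoB, h, h']

-- joining head :: items ++ ["</ol>"] with "\n", on the char side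
theorem pvJoinAux (items : List String) (hd : List Char) :
    PySem.Chars.join "\n".toList (hd :: (items.map String.toList ++ ["</ol>".toList])) =
      hd ++ items.flatMap (fun s => '\n' :: s.toList) ++ "\n</ol>".toList := by
  induction items generalizing hd with
  | nil => simp [PySem.Chars.join_cons_cons, PySem.Chars.join_singleton]
  | cons x items ih =>
    simp only [List.map_cons, List.cons_append]
    rw [PySem.Chars.join_cons_cons, ih]
    simp

-- joining ["<ol>"] ++ items ++ ["</ol>"] with "\n" is "<ol>" ++ flat ++ "\n</ol>" on the char side
theorem pvJoin_eq (items : List String) :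
    (PySem.Str.join "\n" (["<ol>"] ++ items ++ ["</ol>"])).toList =
      "<ol>".toList ++ items.flatMap (fun s => '\n' :: s.toList) ++ "\n</ol>".toList := by
  have := pvJoinAux items "<ol>".toList
  simp only [PySem.Str.toList_join] at *
  simpa using this

-- ===== VERDICT (by name: the statement is the Claim_ definition above) =====
theorem parse_ordered_list_spec : Claim_equal_parse_ordered_list := by
  intro lines _
  unfold Spec_parse_ordered_list parse_ordered_list parse_ordered_list_alt
  rw [pvLoopA_eq, pvGoB_eq]
  refine Prod.ext ?_ (by simp)
  apply String.toList_injective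
  simp only [String.toList_ofList]
  have := pvJoin_eq ((lines.takeWhile pvIsItem).map pvMkItem)
  simp only [List.singleton_append] at this ⊢
  rw [this]
  simp [List.flatMap_map]
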